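-- pv_equiv track=rewrite | github.com/cju0727/Programmers | Stack&Queue/짝지어 제거하기.py | solution
-- ===== SOURCE A (Python) =====
-- def solution(s):
--     answer = -1
--     stack = []
--     for i in s:
--         if not stack:
--             stack.append(i)
--         elif stack[-1] == i:
--             stack.pop()
--         else:
--             stack.append(i)
--
--     answer = 1 if not stack else 0
--     return answer
-- ===== SOURCE B (Python) =====
-- def solution(s):
--     # Reduce the string to a fixed point: each pass removes every
--     # (greedily-matched) adjacent equal pair; stop when a pass changes nothing.
--     t = s
--     while True:
--         out = []
--         i = 0
--         n = len(t)
--         while i < n: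
--             if i + 1 < n and t[i] == t[i + 1]:
--                 i += 2
--             else:
--                 out.append(t[i])
--                 i += 1
--         u = ''.join(out)
--         if u == t:
--             return 1 if not t else 0
--         t = u
-- ===== Notes on version B (the rewrite author's own statement) =====
-- stated objective: alternative
-- what changed: Replaces the single left-to-right stack pass by repeated full scans that delete greedily matched adjacent equal pairs until a fixed point, returning 1 iff the fully reduced string is empty (equivalent because pair-removal does not change the final stack).
import Mathlib
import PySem

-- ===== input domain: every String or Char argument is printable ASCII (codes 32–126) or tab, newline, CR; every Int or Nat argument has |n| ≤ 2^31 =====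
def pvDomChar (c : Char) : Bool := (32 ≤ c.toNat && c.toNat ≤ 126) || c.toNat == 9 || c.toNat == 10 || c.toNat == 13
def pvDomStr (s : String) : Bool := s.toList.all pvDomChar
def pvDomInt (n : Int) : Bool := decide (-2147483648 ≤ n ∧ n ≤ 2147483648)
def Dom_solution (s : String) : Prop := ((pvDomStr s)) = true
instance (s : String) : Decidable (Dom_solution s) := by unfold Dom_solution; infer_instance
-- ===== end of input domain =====

-- B replaces A's single stack pass by repeated whole-string scans removing adjacent
-- equal pairs until a fixed point; same return value, a different (not faster) algorithm.

-- ===== PORT A =====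
-- one loop iteration of A: push onto the stack (top at head) or cancel with the top
def aStep (stack : List Char) (i : Char) : List Char :=
  match stack with
  | [] => [i]
  | top :: rest => if top = i then rest else i :: top :: rest

def solution (s : String) : Int :=
  let stack := s.toList.foldl aStep []
  if stack = [] then 1 else 0

-- ===== PORT B =====
-- one pass of B's inner while loop: skip each greedily matched adjacent equal pair
def onePass : List Char → List Char
  | [] => []
  | [c] => [c]
  | c :: d :: r => if c = d then onePass r else c :: onePass (d :: r)

theorem onePass_len_le : ∀ t : List Char, (onePass t).length ≤ t.length
  | [] => by simp [onePass]
  | [c] => by simp [onePass]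
  | c :: d :: r => by
      by_cases h : c = d <;> simp only [onePass, h, if_true, if_false, List.length_cons]
      · have := onePass_len_le r; omega
      · have := onePass_len_le (d :: r); simp only [List.length_cons] at this ⊢; omega

theorem onePass_lt_of_ne {t : List Char} (h : onePass t ≠ t) : (onePass t).length < t.length := by
  have : ∀ t : List Char, onePass t = t ∨ (onePass t).length + 2 ≤ t.length := by
    intro t
    induction t using onePass.induct with
    | case1 => left; rfl
    | case2 c => left; rfl
    | case3 d r ih =>
        right
        have := onePass_len_le r; simp [onePass]; omega
    | case4 c d r hcd ih =>
        rcases ih with h1 | h1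
        · left; simp [onePass, hcd, h1]
        · right; simp only [onePass, hcd, if_false, List.length_cons]
          simp only [List.length_cons] at h1; omega
  rcases this t with h1 | h1
  · exact absurd h1 h
  · omega

-- B's outer while loop: reduce to a fixed point of onePass
def reduceFix (t : List Char) : List Char :=
  if h : onePass t = t then t else reduceFix (onePass t)
termination_by t.length
decreasing_by exact onePass_lt_of_ne h

def solution_alt (s : String) : Int :=
  if reduceFix s.toList = [] then 1 else 0

-- ===== PRECONDITION & SPEC =====
def Spec_solution (s : String) (out : Int) : Prop := out = solution_alt s
instance (s : String) (out : Int) : Decidable (Spec_solution s out) := by unfold Spec_solution; infer_instance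

-- ===== CLAIM (what is proved, stated in full; the proofs are below) =====
def Claim_equal_solution : Prop := ∀ (s : String), Dom_solution s → Spec_solution s (solution s)

-- ===== LEMMAS AND PROOFS =====

-- A's stack never holds two equal adjacent characters
def Reduced (l : List Char) : Prop := List.IsChain (· ≠ ·) l

theorem reduced_aStep {st : List Char} (h : Reduced st) (c : Char) : Reduced (aStep st c) := by
  match st with
  | [] => simp [aStep, Reduced]
  | d :: t =>
      by_cases hdc : d = c
      · simpa [aStep, hdc, Reduced] using (List.isChain_cons.mp h).2
      · simpa [aStep, hdc, Reduced, List.isChain_cons_cons] using ⟨Ne.symm hdc, h⟩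

-- feeding the pair c,c onto a reduced stack is the identity
theorem aStep_cancel {st : List Char} (h : Reduced st) (c : Char) :
    aStep (aStep st c) c = st := by
  match st with
  | [] => simp [aStep]
  | d :: t =>
      by_cases hdc : d = c
      · subst hdc
        match t with
        | [] => simp [aStep]
        | e :: u =>
            have hde : d ≠ e := (List.isChain_cons_cons.mp h).1
            simp [aStep, Ne.symm hde]
      · simp [aStep, hdc]

-- removing greedily matched pairs does not change the resulting stack
theorem foldl_onePass (t : List Char) : ∀ st : List Char, Reduced st →
    (onePass t).foldl aStep st = t.foldl aStep st := by
  induction t using onePass.induct with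
  | case1 => intro st _; rfl
  | case2 c => intro st _; rfl
  | case3 d r ih =>
      intro st hst
      simp only [onePass, if_true, List.foldl_cons]
      rw [ih st hst, aStep_cancel hst]
  | case4 c d r hcd ih =>
      intro st hst
      simp only [onePass, hcd, if_false, List.foldl_cons]
      exact ih (aStep st c) (reduced_aStep hst c)

-- hence the whole fixed-point reduction does not change the resulting stack
theorem foldl_reduceFix (t : List Char) : (reduceFix t).foldl aStep [] = t.foldl aStep [] := by
  induction t using reduceFix.induct with
  | case1 t h => rw [reduceFix, dif_pos h]
  | case2 t h ih =>
      rw [reduceFix, dif_neg h]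
      rw [ih, foldl_onePass t [] (by simp [Reduced])]

-- a fixed point of onePass has no adjacent equal characters
theorem reduced_of_fix : ∀ t : List Char, onePass t = t → Reduced t := by
  intro t
  induction t using onePass.induct with
  | case1 => intro _; simp [Reduced]
  | case2 c => intro _; simp [Reduced]
  | case3 d r ih =>
      intro h
      exfalso
      have hlen := onePass_len_le r
      have hl : (onePass (d :: d :: r)).length = (d :: d :: r).length := by rw [h]
      simp only [onePass, if_true, List.length_cons] at hl
      omega
  | case4 c d r hcd ih =>
      intro h
      simp only [onePass, hcd, if_false, List.cons.injEq, true_and] at h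
      exact List.isChain_cons_cons.mpr ⟨hcd, ih h⟩

-- reduceFix returns a fixed point of onePass
theorem onePass_reduceFix (t : List Char) : onePass (reduceFix t) = reduceFix t := by
  induction t using reduceFix.induct with
  | case1 t h => rw [reduceFix, dif_pos h]; exact h
  | case2 t h ih => rw [reduceFix, dif_neg h]; exact ih

-- feeding a word that never cancels against the stack just pushes everything
theorem foldl_push : ∀ (w st : List Char), List.IsChain (· ≠ ·) w →
    (∀ d ∈ st.head?, ∀ c ∈ w.head?, d ≠ c) →
    w.foldl aStep st = w.reverse ++ st := by
  intro w
  induction w with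
  | nil => intro st _ _; simp
  | cons c v ih =>
      intro st hw hh
      have hstep : aStep st c = c :: st := by
        match st with
        | [] => rfl
        | d :: t =>
            have : d ≠ c := hh d (by simp) c (by simp)
            simp [aStep, this]
      simp only [List.foldl_cons, hstep]
      rw [ih (c :: st) (List.isChain_cons.mp hw).2]
      · simp
      · intro d hd e he
        simp only [List.head?_cons, Option.mem_def, Option.some.injEq] at hd
        subst hd
        exact (List.isChain_cons.mp hw).1 e he

theorem foldl_reduced_eq_reverse {w : List Char} (h : Reduced w) :
    w.foldl aStep [] = w.reverse := by
  simpa using foldl_push w [] h (by simp)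

-- ===== VERDICT (by name: the statement is the Claim_ definition above) =====
theorem solution_spec : Claim_equal_solution := by
  intro s _
  unfold Spec_solution solution solution_alt
  have hfix := foldl_reduceFix s.toList
  have hred : Reduced (reduceFix s.toList) :=
    reduced_of_fix _ (onePass_reduceFix s.toList)
  have hrev := foldl_reduced_eq_reverse hred
  by_cases h : reduceFix s.toList = []
  · simp only [h, if_true]
    rw [← hfix, h]
    simp
  · simp only [h, if_false]
    have hne : s.toList.foldl aStep [] ≠ [] := by
      rw [← hfix, hrev]
      simpa using h
    simp [hne]
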